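-- pv_equiv track=rewrite | github.com/newfull5/Programmers | 디펜스 게임.py | solution
-- ===== SOURCE A (Python) =====
-- from heapq import heapify, heappop, heappush
-- from collections import deque
--
-- def solution(n, k, enemy):
--     cnt = k
--     length = len(enemy)
--     queue = deque(enemy)
--     heap = []
--
--     while queue:
--         element = queue.popleft() * -1
--         heappush(heap, element)
--
--         if sum(heap)*-1 > n:
--             if k > 0:
--                 k -= 1
--                 heappop(heap)
--
--             elif k == 0:
--                 return len(heap) + cnt -1
--
--     return length
-- ===== SOURCE B (Python) =====
-- def solution(n, k, enemy):
--     # Enemies currently being fought, kept as a descending sorted list;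
--     # running sum maintained incrementally instead of re-summing each round.
--     kept = []
--     s = 0
--     for i, e in enumerate(enemy):
--         lo, hi = 0, len(kept)
--         while lo < hi:
--             mid = (lo + hi) // 2
--             if kept[mid] >= e:
--                 lo = mid + 1
--             else:
--                 hi = mid
--         kept.insert(lo, e)
--         s += e
--         if s > n:
--             if k > 0:
--                 s -= kept.pop(0)
--                 k -= 1
--             elif k == 0:
--                 return i
--     return len(enemy)
-- ===== Notes on version B (the rewrite author's own statement) =====
-- stated objective: faster
-- what changed: Replaced the max-heap plus full sum(heap) re-scan each round by a descending sorted list maintained with binary-search insertion and an incrementally updated running sum.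
import Mathlib
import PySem

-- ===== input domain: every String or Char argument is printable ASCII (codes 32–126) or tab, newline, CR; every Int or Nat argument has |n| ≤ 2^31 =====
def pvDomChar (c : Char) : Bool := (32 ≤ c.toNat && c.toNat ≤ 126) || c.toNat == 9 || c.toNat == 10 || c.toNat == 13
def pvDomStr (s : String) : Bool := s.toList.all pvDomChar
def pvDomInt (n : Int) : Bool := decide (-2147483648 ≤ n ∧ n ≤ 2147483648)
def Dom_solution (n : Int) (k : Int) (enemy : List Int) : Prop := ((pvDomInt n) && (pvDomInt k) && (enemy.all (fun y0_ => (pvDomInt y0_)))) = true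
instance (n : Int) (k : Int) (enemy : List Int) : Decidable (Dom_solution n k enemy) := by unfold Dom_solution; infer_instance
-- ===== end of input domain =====

-- B replaces A's max-heap with its full sum(heap) re-scan every round by a descending
-- sorted list (binary-search insertion) with an incrementally maintained running sum.

-- ===== PORT A =====
-- heapq is ported at the level of the heap's multiset of values: heappush adds the
-- element, heappop removes the minimum value. This is exact because A observes the
-- heap only through sum(heap), len(heap) and the popped minimum value, all of which
-- are independent of heapq's internal array layout.
def pvHeapPop (h : List Int) : Int × List Int :=
  match h.min? with
  | some m => (m, h.erase m)
  | none => (0, [])  -- unreachable: A only pops a heap it has just pushed onto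

-- the `while queue` loop of A; state: remaining queue, heap, k
def pvGoA (n cnt length : Int) : List Int → List Int → Int → Int
  | [], _heap, _k => length
  | q :: queue, heap, k =>
    let element := q * -1
    let heap' := element :: heap          -- heappush(heap, element)
    if heap'.sum * -1 > n then
      if k > 0 then pvGoA n cnt length queue (pvHeapPop heap').2 (k - 1)
      else if k = 0 then (heap'.length : Int) + cnt - 1
      else pvGoA n cnt length queue heap' k
    else pvGoA n cnt length queue heap' k

def solution (n : Int) (k : Int) (enemy : List Int) : Int :=
  pvGoA n k (enemy.length : Int) enemy [] k

-- ===== PORT B =====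
-- the hand-written binary search of Source B: first index with kept[idx] < e in the
-- descending list kept (kept.getD mid 0 ports kept[mid]; mid is always in range)
def pvBS (kept : List Int) (e : Int) (lo hi : Nat) : Nat :=
  if lo < hi then
    if e ≤ kept.getD ((lo + hi) / 2) 0 then pvBS kept e ((lo + hi) / 2 + 1) hi
    else pvBS kept e lo ((lo + hi) / 2)
  else lo
termination_by hi - lo
decreasing_by all_goals omega

-- the `for i, e in enumerate(enemy)` loop of Source B; state: rest, i, kept (descending), s, k
def pvGoB (n len : Int) : List Int → Int → List Int → Int → Int → Int
  | [], _i, _kept, _s, _k => len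
  | e :: rest, i, kept, s, k =>
    let kept' := PySem.List.insert kept ((pvBS kept e 0 kept.length : Nat) : Int) e
    let s' := s + e
    if s' > n then
      if k > 0 then
        match PySem.List.pop? kept' 0 with   -- kept.pop(0)
        | some (v, kept'') => pvGoB n len rest (i + 1) kept'' (s' - v) (k - 1)
        | none => 0                           -- unreachable: kept' is nonempty
      else if k = 0 then i
      else pvGoB n len rest (i + 1) kept' s' k
    else pvGoB n len rest (i + 1) kept' s' k

def solution_alt (n : Int) (k : Int) (enemy : List Int) : Int :=
  pvGoB n (enemy.length : Int) enemy 0 [] 0 k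

-- ===== PRECONDITION & SPEC =====
def Spec_solution (n : Int) (k : Int) (enemy : List Int) (out : Int) : Prop := out = solution_alt n k enemy
instance (n : Int) (k : Int) (enemy : List Int) (out : Int) : Decidable (Spec_solution n k enemy out) := by unfold Spec_solution; infer_instance

-- ===== CLAIM (what is proved, stated in full; the proofs are below) =====
def Claim_equal_solution : Prop := ∀ (n : Int) (k : Int) (enemy : List Int), Dom_solution n k enemy → Spec_solution n k enemy (solution n k enemy)

-- ===== LEMMAS AND PROOFS =====

-- reference linear insertion into a descending list (ties go after earlier equals,
-- exactly where Source B's binary search puts them)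
def insDesc (e : Int) : List Int → List Int
  | [] => [e]
  | x :: xs => if e ≤ x then x :: insDesc e xs else e :: x :: xs

theorem insDesc_eq_takeWhile (e : Int) (l : List Int) :
    insDesc e l = l.takeWhile (fun x => decide (e ≤ x)) ++ e :: l.dropWhile (fun x => decide (e ≤ x)) := by
  induction l with
  | nil => simp [insDesc]
  | cons x xs ih =>
    by_cases h : e ≤ x <;> simp [insDesc, List.takeWhile, List.dropWhile, h, ih]

theorem insDesc_perm (e : Int) (l : List Int) : (insDesc e l).Perm (e :: l) := by
  induction l with
  | nil => simp [insDesc]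
  | cons x xs ih =>
    by_cases h : e ≤ x
    · simpa [insDesc, h] using (ih.cons x).trans (List.Perm.swap e x xs)
    · simp [insDesc, h]

theorem insDesc_sorted (e : Int) (l : List Int) (h : l.Pairwise (· ≥ ·)) :
    (insDesc e l).Pairwise (· ≥ ·) := by
  induction l with
  | nil => simp [insDesc]
  | cons x xs ih =>
    rcases List.pairwise_cons.mp h with ⟨hx, hxs⟩
    by_cases he : e ≤ x
    · simp only [insDesc, if_pos he]
      refine List.pairwise_cons.mpr ⟨?_, ih hxs⟩
      intro y hy
      rcases List.mem_cons.mp ((insDesc_perm e xs).mem_iff.mp hy) with rfl | h2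
      · omega
      · exact hx y h2
    · simp only [insDesc, if_neg he]
      refine List.pairwise_cons.mpr ⟨?_, h⟩
      intro y hy
      rcases List.mem_cons.mp hy with rfl | h2
      · omega
      · have := hx y h2; omega

-- the split point of a descending sorted list: e ≤ kept[idx] exactly on the takeWhile prefix
theorem char_takeWhile (e : Int) (kept : List Int) (hs : kept.Pairwise (· ≥ ·)) :
    ∀ idx (hidx : idx < kept.length),
      (e ≤ kept[idx]) ↔ idx < (kept.takeWhile (fun x => decide (e ≤ x))).length := by
  induction kept with
  | nil => intro idx hidx; simp at hidx
  | cons x xs ih =>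
    rcases List.pairwise_cons.mp hs with ⟨hx, hxs⟩
    intro idx hidx
    by_cases he : e ≤ x
    · rw [List.takeWhile_cons_of_pos (by simpa using he)]
      cases idx with
      | zero => simpa using he
      | succ j =>
        have hj : j < xs.length := by simpa using hidx
        simpa using (ih hxs j hj).trans (by omega)
    · rw [List.takeWhile_cons_of_neg (by simpa using he)]
      simp only [List.length_nil]
      cases idx with
      | zero => simpa using he
      | succ j =>
        have hj : j < xs.length := by simpa using hidx
        have hle : x ≥ xs[j] := hx _ (List.getElem_mem hj)
        simp only [List.getElem_cons_succ]
        omega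

theorem pvBS_eq (kept : List Int) (e : Int) (J : Nat)
    (hchar : ∀ idx (h : idx < kept.length), (e ≤ kept[idx]) ↔ idx < J) :
    ∀ fuel lo hi, hi - lo ≤ fuel → lo ≤ J → J ≤ hi → hi ≤ kept.length →
      pvBS kept e lo hi = J := by
  intro fuel
  induction fuel with
  | zero =>
    intro lo hi hfuel h1 h2 h3
    rw [pvBS, if_neg (by omega)]
    omega
  | succ m ih =>
    intro lo hi hfuel h1 h2 h3
    rw [pvBS]
    by_cases hlh : lo < hi
    · rw [if_pos hlh]
      have hmid1 : lo ≤ (lo + hi) / 2 := by omega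
      have hmid2 : (lo + hi) / 2 < hi := by omega
      have hmidlen : (lo + hi) / 2 < kept.length := by omega
      rw [List.getD_eq_getElem kept 0 hmidlen]
      by_cases hle : e ≤ kept[(lo + hi) / 2]
      · rw [if_pos hle]
        have := (hchar _ hmidlen).mp hle
        exact ih _ _ (by omega) (by omega) (by omega) (by omega)
      · rw [if_neg hle]
        have : ¬ ((lo + hi) / 2 < J) := fun hc => hle ((hchar _ hmidlen).mpr hc)
        exact ih _ _ (by omega) (by omega) (by omega) (by omega)
    · rw [if_neg hlh]; omega

-- Source B's binary-search insert equals linear descending insertion on a sorted list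
theorem insert_bs_eq (e : Int) (kept : List Int) (hs : kept.Pairwise (· ≥ ·)) :
    PySem.List.insert kept ((pvBS kept e 0 kept.length : Nat) : Int) e = insDesc e kept := by
  have hsplit := List.takeWhile_append_dropWhile (p := fun x => decide (e ≤ x)) (l := kept)
  have hJlen : (kept.takeWhile (fun x => decide (e ≤ x))).length ≤ kept.length := by
    have := congrArg List.length hsplit
    simp only [List.length_append] at this
    omega
  rw [pvBS_eq kept e _ (char_takeWhile e kept hs) kept.length 0 kept.length
      (by omega) (by omega) hJlen le_rfl]
  rw [PySem.List.insert_natCast kept _ e hJlen, insDesc_eq_takeWhile]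
  set tw := kept.takeWhile (fun x => decide (e ≤ x)) with htw
  set dw := kept.dropWhile (fun x => decide (e ≤ x)) with hdw
  rw [← hsplit, List.take_left, List.drop_left]

-- lock-step simulation: A's heap is the negation of B's kept list as a multiset,
-- B's s is the kept sum, and B's index i tracks len(kept) + pops
theorem go_eq (n cnt len : Int) (queue : List Int) :
    ∀ (kept heap : List Int) (s k i : Int),
      kept.Pairwise (· ≥ ·) →
      (kept.map (fun x => -x)).Perm heap →
      s = kept.sum →
      i = (kept.length : Int) + cnt - k →
      pvGoA n cnt len queue heap k = pvGoB n len queue i kept s k := by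
  induction queue with
  | nil => intro kept heap s k i _ _ _ _; simp [pvGoA, pvGoB]
  | cons e rest ih =>
    intro kept heap s k i hs hp hsum hi
    have hins := insert_bs_eq e kept hs
    have hpermk : (insDesc e kept).Perm (e :: kept) := insDesc_perm e kept
    have hsort' : (insDesc e kept).Pairwise (· ≥ ·) := insDesc_sorted e kept hs
    obtain ⟨h0, t, hkd⟩ : ∃ h0 t, insDesc e kept = h0 :: t := by
      cases hc : insDesc e kept with
      | nil => exact absurd (hc ▸ hpermk).length_eq (by simp)
      | cons a b => exact ⟨a, b, rfl⟩
    rw [hkd] at hpermk hsort'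
    have hins2 : PySem.List.insert kept ((pvBS kept e 0 kept.length : Nat) : Int) e = h0 :: t :=
      hins.trans hkd
    have hperm' : ((h0 :: t).map (fun x => -x)).Perm ((e * -1) :: heap) := by
      have h1 : ((h0 :: t).map (fun x => -x)).Perm ((e :: kept).map (fun x => -x)) := hpermk.map _
      have h2 : ((e :: kept).map (fun x => -x)) = (e * -1) :: kept.map (fun x => -x) := by
        simp only [List.map_cons, mul_neg_one]
      exact (h2 ▸ h1).trans (hp.cons (e * -1))
    have hsumk : h0 + t.sum = s + e := by
      have := hpermk.sum_eq
      simp only [List.sum_cons] at this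
      omega
    have hsumA : ((e * -1) :: heap).sum = -(s + e) := by
      have h1 : ((e * -1) :: heap).sum = ((h0 :: t).map (fun x => -x)).sum := hperm'.symm.sum_eq
      have h2 : ∀ l : List Int, (l.map (fun x => -x)).sum = -l.sum := by
        intro l; induction l with
        | nil => simp
        | cons x xs ihl => simp only [List.map_cons, List.sum_cons, ihl]; ring
      rw [h1, h2, List.sum_cons]
      omega
    have hlent : t.length = kept.length := by
      have := hpermk.length_eq
      simp at this
      omega
    simp only [pvGoA, pvGoB, hins2, hsumA]
    have hmul : -(s + e) * -1 = s + e := by ring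
    simp only [hmul]
    by_cases hgt : s + e > n
    · rw [if_pos hgt, if_pos hgt]
      by_cases hk : k > 0
      · rw [if_pos hk, if_pos hk]
        -- A pops the minimum of the negated heap = -(max of kept') = -h0
        have hmin : ((e * -1) :: heap).min? = some (-h0) := by
          refine List.min?_eq_some_iff.mpr ⟨?_, ?_⟩
          · exact hperm'.mem_iff.mp (by simp)
          · intro b hb
            rcases List.mem_map.mp (hperm'.mem_iff.mpr hb) with ⟨y, hy, rfl⟩
            rcases List.mem_cons.mp hy with rfl | hyt
            · omega
            · have := (List.pairwise_cons.mp hsort').1 y hyt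
              omega
        have hpop : pvHeapPop ((e * -1) :: heap) = (-h0, ((e * -1) :: heap).erase (-h0)) := by
          simp only [pvHeapPop, hmin]
        rw [hpop, PySem.List.pop?_zero_cons h0 t]
        have herase : (t.map (fun x => -x)).Perm (((e * -1) :: heap).erase (-h0)) := by
          have h1 : (((e * -1) :: heap).erase (-h0)).Perm (((h0 :: t).map (fun x => -x)).erase (-h0)) :=
        (hperm'.symm).erase (-h0)
          have h2 : ((h0 :: t).map (fun x => -x)).erase (-h0) = t.map (fun x => -x) := by
            rw [← List.map_erase neg_injective, List.erase_cons_head]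
          exact (h2 ▸ h1).symm
        exact ih t _ (s + e - h0) (k - 1) (i + 1) hsort'.of_cons herase (by omega)
          (by rw [hlent]; omega)
      · rw [if_neg hk, if_neg hk]
        by_cases hk0 : k = 0
        · rw [if_pos hk0, if_pos hk0]
          have hlh : ((e * -1) :: heap).length = t.length + 1 := by
            have := hperm'.length_eq
            simpa using this.symm
          rw [hlh]
          push_cast
          omega
        · rw [if_neg hk0, if_neg hk0]
          exact ih (h0 :: t) _ (s + e) k (i + 1) hsort' hperm' (by simp; omega)
            (by simp [hlent]; omega)
    · rw [if_neg hgt, if_neg hgt]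
      exact ih (h0 :: t) _ (s + e) k (i + 1) hsort' hperm' (by simp; omega)
        (by simp [hlent]; omega)

-- ===== VERDICT (by name: the statement is the Claim_ definition above) =====
theorem solution_spec : Claim_equal_solution := by
  intro n k enemy _
  unfold Spec_solution solution solution_alt
  exact go_eq n k (enemy.length : Int) enemy [] [] 0 k 0 (by simp) (by simp) (by simp) (by simp)
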